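-- pv_equiv track=rewrite | github.com/rogerioacp/bib2conexp | conexpfrombib.py | generateMap
-- ===== SOURCE A (Python) =====
-- def generateMap(entries):
-- 	"""
-- 		Receives as input the entries available on the .bib file
-- 		and returns a mapping from Keyword to a number.
-- 		Additionaly the total number of keywords is also returned.
-- 		The number represents the keyword position in the final csv file
-- 		return (resMap, maxKeywords)
-- 	"""
-- 	pos = 0
-- 	resMap = {}
--
-- 	for entrie in entries:
-- 			#If the entrie contains a keyword tag
-- 		if "keyword" in entrie:
-- 			#create a list of keywords
-- 			keywords = map(str.strip,entrie["keyword"].split(","))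
--
-- 			#For each keyworc check if it is in the dictionary, if not
-- 			# then add it
-- 			for keyword in keywords:
-- 				if keyword not in resMap:
-- 					resMap[keyword] = pos
-- 					pos += 1
--
-- 	return (resMap,pos)
-- ===== SOURCE B (Python) =====
-- def generateMap(entries):
--     # Flatten all stripped keywords, then pair each distinct keyword with its
--     # first-occurrence index (list.index), sort the unique pairs by that index
--     # and enumerate the sorted sequence to assign positions.
--     flat = [k.strip() for e in entries if "keyword" in e
--                       for k in e["keyword"].split(",")]
--     pairs = sorted({(flat.index(k), k) for k in flat}, key=lambda p: p[0])
--     resMap = {k: pos for pos, (_, k) in enumerate(pairs)}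
--     return (resMap, len(pairs))
-- ===== Notes on version B (the rewrite author's own statement) =====
-- stated objective: alternative
-- what changed: A builds the map incrementally with a membership test and a running position counter; B instead pairs each keyword with its first-occurrence index via list.index, takes the set of these (index, keyword) pairs, sorts them by index and enumerates the sorted sequence to assign positions.
import Mathlib
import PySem

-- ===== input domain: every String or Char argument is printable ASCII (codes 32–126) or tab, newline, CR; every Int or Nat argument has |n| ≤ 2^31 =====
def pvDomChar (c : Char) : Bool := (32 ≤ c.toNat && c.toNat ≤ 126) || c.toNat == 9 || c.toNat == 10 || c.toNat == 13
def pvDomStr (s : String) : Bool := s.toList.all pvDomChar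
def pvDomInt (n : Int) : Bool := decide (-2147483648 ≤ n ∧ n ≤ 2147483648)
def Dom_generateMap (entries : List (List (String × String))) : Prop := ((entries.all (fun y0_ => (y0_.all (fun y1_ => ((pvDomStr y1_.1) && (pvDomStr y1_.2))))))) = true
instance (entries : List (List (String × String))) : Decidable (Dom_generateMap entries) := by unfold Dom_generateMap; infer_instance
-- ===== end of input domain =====

-- One honest line: B replaces A's incremental membership-tested dict build by a
-- first-occurrence-index pairing (list.index), a set of pairs sorted by index,
-- and one enumerate pass; an alternative algorithm of the same results.

-- ===== PORT A =====
-- A's inner step: 'if keyword not in resMap: resMap[keyword] = pos; pos += 1'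
def gmStepA (st : PySem.Dict String Int × Int) (k : String) : PySem.Dict String Int × Int :=
  if st.1.contains k then st else (st.1.insert k st.2, st.2 + 1)

def generateMap (entries : List (List (String × String))) : (List (String × Int)) × Int :=
  let st := entries.foldl (fun (st : PySem.Dict String Int × Int) entrie =>
    match (PySem.Dict.mk entrie).get? "keyword" with
    | some v => (((PySem.Str.split? v ",").getD []).map PySem.Str.strip).foldl gmStepA st
    | none => st) (PySem.Dict.empty, 0)
  (st.1.items, st.2)

-- ===== PORT B =====
-- 'k.strip() for k in e["keyword"].split(",")' for one entry with a "keyword" key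
def gmKeywords (entrie : List (String × String)) : List String :=
  match (PySem.Dict.mk entrie).get? "keyword" with
  | some v => ((PySem.Str.split? v ",").getD []).map PySem.Str.strip
  | none => []

-- the pair (flat.index(k), k); index? never misses since k is drawn from flat
def gmPair (flat : List String) (k : String) : Int × String :=
  ((((PySem.List.index? flat k).getD 0 : Nat) : Int), k)

def generateMap_alt (entries : List (List (String × String))) : (List (String × Int)) × Int :=
  let flat := entries.flatMap gmKeywords
  let pairs := PySem.List.sorted (PySem.Set.ofList (flat.map (gmPair flat))) (fun p => p.1) false
  let resMap := (PySem.List.enumerate pairs).map (fun p => (p.2.2, p.1))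
  (resMap, (pairs.length : Int))

-- ===== PRECONDITION & SPEC =====
def Spec_generateMap (entries : List (List (String × String))) (out : (List (String × Int)) × Int) : Prop := out = generateMap_alt entries
instance (entries : List (List (String × String))) (out : (List (String × Int)) × Int) : Decidable (Spec_generateMap entries out) := by unfold Spec_generateMap; infer_instance

-- ===== CLAIM (what is proved, stated in full; the proofs are below) =====
def Claim_equal_generateMap : Prop := ∀ (entries : List (List (String × String))), Dom_generateMap entries → Spec_generateMap entries (generateMap entries)

-- ===== LEMMAS AND PROOFS =====

-- the map A builds after seeing the distinct keywords l, as an items list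
def gmEnumMap (l : List String) : List (String × Int) :=
  (PySem.List.enumerate l).map (fun p => (p.2, p.1))

theorem gmEnumMap_keys (l : List String) :
    (PySem.Dict.mk (gmEnumMap l)).keys = l := by
  simp [gmEnumMap, PySem.Dict.keys, List.map_map, Function.comp_def,
    PySem.List.map_snd_enumerate]

theorem gmEnumMap_append (l : List String) (k : String) :
    gmEnumMap (l ++ [k]) = gmEnumMap l ++ [(k, (l.length : Int))] := by
  simp [gmEnumMap, PySem.List.enumerate_append, PySem.List.enumerate_cons,
    PySem.List.enumerate_nil]

theorem gmStepA_inv (l : List String) (k : String) :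
    gmStepA (PySem.Dict.mk (gmEnumMap l), (l.length : Int)) k =
      (PySem.Dict.mk (gmEnumMap (PySem.Set.add l k)),
        (((PySem.Set.add l k) : List String).length : Int)) := by
  by_cases hk : k ∈ l
  · have hc : (PySem.Dict.mk (gmEnumMap l)).contains k = true := by
      rw [PySem.Dict.contains_eq_decide_mem_keys, gmEnumMap_keys]; simpa
    simp [gmStepA, hc, PySem.Set.add_of_mem hk]
  · have hc : (PySem.Dict.mk (gmEnumMap l)).contains k = false := by
      rw [PySem.Dict.contains_eq_decide_mem_keys, gmEnumMap_keys]; simpa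
    simp only [gmStepA, hc, Bool.false_eq_true, if_false, PySem.Set.add_of_not_mem hk]
    refine Prod.ext ?_ ?_
    · apply PySem.Dict.ext
      rw [PySem.Dict.items_insert_of_not_contains _ _ hc, gmEnumMap_append]
    · simp

theorem gmFold_inv (ks l : List String) :
    ks.foldl gmStepA (PySem.Dict.mk (gmEnumMap l), (l.length : Int)) =
      (PySem.Dict.mk (gmEnumMap (ks.foldl PySem.Set.add l)),
        ((ks.foldl PySem.Set.add l).length : Int)) := by
  induction ks generalizing l with
  | nil => rfl
  | cons k ks ih =>
    simp only [List.foldl_cons, gmStepA_inv]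
    exact ih _

-- A's nested loop is a fold of the inner step over the flattened keyword stream
theorem gmOuter_flat (entries : List (List (String × String)))
    (st : PySem.Dict String Int × Int) :
    entries.foldl (fun st entrie =>
      match (PySem.Dict.mk entrie).get? "keyword" with
      | some v => (((PySem.Str.split? v ",").getD []).map PySem.Str.strip).foldl gmStepA st
      | none => st) st =
    (entries.flatMap gmKeywords).foldl gmStepA st := by
  induction entries generalizing st with
  | nil => rfl
  | cons e es ih =>
    simp only [List.foldl_cons, List.flatMap_cons, List.foldl_append]
    rw [ih]
    unfold gmKeywords
    cases (PySem.Dict.mk e).get? "keyword" <;> rfl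

-- Set.add commutes with mapping an injective function
theorem gmMap_add {α β : Type} [BEq α] [LawfulBEq α] [BEq β] [LawfulBEq β]
    (f : α → β) (hf : Function.Injective f) (s : List α) (a : α) :
    (PySem.Set.add s a).map f = PySem.Set.add (s.map f) (f a) := by
  rw [PySem.Set.add_eq_ite, PySem.Set.add_eq_ite]
  by_cases h : a ∈ s
  · simp [h, List.mem_map_of_mem]
  · have : f a ∉ s.map f := by
      intro hm
      obtain ⟨x, hx, he⟩ := List.mem_map.mp hm
      exact h (hf he ▸ hx)
    simp [h, this]

theorem gmFoldAdd_map {α β : Type} [BEq α] [LawfulBEq α] [BEq β] [LawfulBEq β]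
    (f : α → β) (hf : Function.Injective f) (xs : List α) (s : List α) :
    (xs.map f).foldl PySem.Set.add (s.map f) = (xs.foldl PySem.Set.add s).map f := by
  induction xs generalizing s with
  | nil => rfl
  | cons x xs ih =>
    simp only [List.map_cons, List.foldl_cons]
    rw [← gmMap_add f hf, ih]

-- set(xs.map f) = (set xs).map f for injective f
theorem gmOfList_map {α β : Type} [BEq α] [LawfulBEq α] [BEq β] [LawfulBEq β]
    (f : α → β) (hf : Function.Injective f) (xs : List α) :
    PySem.Set.ofList (xs.map f) = (PySem.Set.ofList xs).map f := by
  rw [PySem.Set.ofList_eq_foldl, PySem.Set.ofList_eq_foldl]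
  simpa using gmFoldAdd_map f hf xs []

-- first-occurrence indices strictly increase along the dedup order
theorem gmIdx_pairwise (xs : List String) :
    (PySem.List.dedup xs).Pairwise
      (fun a b => ((PySem.List.index? xs a).getD 0) < ((PySem.List.index? xs b).getD 0)) := by
  induction xs with
  | nil => simp [PySem.List.dedup]
  | cons x xs ih =>
    rw [PySem.List.dedup_eq_ofList, PySem.Set.ofList_cons]
    constructor
    · intro b hb
      have hbd := (PySem.Set.mem_discard (PySem.Set.ofList xs) x b).mp hb
      have hbx : b ≠ x := hbd.2
      have hbxs : b ∈ xs := (PySem.Set.mem_ofList xs b).mp hbd.1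
      obtain ⟨i, hi⟩ := Option.isSome_iff_exists.mp ((PySem.List.index?_isSome_iff xs b).mpr hbxs)
      rw [PySem.List.index?_cons_self, PySem.List.index?_cons_of_ne xs (Ne.symm hbx), hi]
      simp
    · have hdf : (PySem.Set.ofList xs).discard x =
          (PySem.Set.ofList xs).filter (fun y => !(y == x)) := rfl
      have hp : ((PySem.Set.ofList xs).discard x).Pairwise
          (fun a b => ((PySem.List.index? xs a).getD 0) < ((PySem.List.index? xs b).getD 0)) := by
        rw [hdf]
        exact List.Pairwise.filter _ (PySem.List.dedup_eq_ofList xs ▸ ih)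
      refine hp.imp_of_mem ?_
      intro a b ha hb hab
      have hax : a ≠ x := ((PySem.Set.mem_discard _ _ _).mp ha).2
      have hbx : b ≠ x := ((PySem.Set.mem_discard _ _ _).mp hb).2
      have haxs : a ∈ xs := (PySem.Set.mem_ofList xs a).mp ((PySem.Set.mem_discard _ _ _).mp ha).1
      have hbxs : b ∈ xs := (PySem.Set.mem_ofList xs b).mp ((PySem.Set.mem_discard _ _ _).mp hb).1
      obtain ⟨i, hi⟩ := Option.isSome_iff_exists.mp ((PySem.List.index?_isSome_iff xs a).mpr haxs)
      obtain ⟨j, hj⟩ := Option.isSome_iff_exists.mp ((PySem.List.index?_isSome_iff xs b).mpr hbxs)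
      rw [PySem.List.index?_cons_of_ne xs (Ne.symm hax), PySem.List.index?_cons_of_ne xs (Ne.symm hbx), hi, hj]
      rw [hi, hj] at hab
      simpa using hab

-- gmPair is injective (second components)
theorem gmPair_inj (flat : List String) : Function.Injective (gmPair flat) := by
  intro a b h
  simpa [gmPair] using congrArg Prod.snd h

-- B's sorted set of pairs is exactly the dedup order paired with its indices
theorem gmSorted_eq (flat : List String) :
    PySem.List.sorted (PySem.Set.ofList (flat.map (gmPair flat))) (fun p => p.1) false =
      (PySem.List.dedup flat).map (gmPair flat) := by
  rw [gmOfList_map (gmPair flat) (gmPair_inj flat) flat, ← PySem.List.dedup_eq_ofList]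
  apply PySem.List.sorted_eq_of_perm_of_pairwise_lt
  · exact List.Perm.refl _
  · rw [List.pairwise_map]
    refine (gmIdx_pairwise flat).imp ?_
    intro a b hab
    simpa [gmPair] using hab

-- enumerating the paired list and projecting recovers gmEnumMap
theorem gmEnum_map_pair (flat l : List String) (s : Int) :
    (PySem.List.enumerate (l.map (gmPair flat)) s).map (fun p => (p.2.2, p.1)) =
      (PySem.List.enumerate l s).map (fun p => (p.2, p.1)) := by
  induction l generalizing s with
  | nil => rfl
  | cons a l ih =>
    simp only [List.map_cons, PySem.List.enumerate_cons, List.map_cons, ih]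
    rfl

-- ===== VERDICT (by name: the statement is the Claim_ definition above) =====
theorem generateMap_spec : Claim_equal_generateMap := by
  intro entries _
  unfold Spec_generateMap
  show generateMap entries = generateMap_alt entries
  simp only [generateMap, generateMap_alt]
  rw [gmOuter_flat]
  have h0 : ((PySem.Dict.empty : PySem.Dict String Int), (0 : Int)) =
      (PySem.Dict.mk (gmEnumMap []), (([] : List String).length : Int)) := rfl
  rw [h0, gmFold_inv]
  have hd : (entries.flatMap gmKeywords).foldl PySem.Set.add [] =
      PySem.List.dedup (entries.flatMap gmKeywords) := by
    rw [PySem.List.dedup_eq_ofList, PySem.Set.ofList_eq_foldl]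
  rw [gmSorted_eq, gmEnum_map_pair]
  simp only [hd, gmEnumMap, List.length_map]
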